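-- pv_equiv track=rewrite | github.com/JaeYoung-Cho-95/CodingTest | Programmers/lv2/택배 배달과 수거하기.py | find_first_point
-- ===== SOURCE A (Python) =====
-- def find_first_point(n,deliveries, pickups):
--     for i in range(n, -1, -1):
--         if deliveries[i] >= 1:
--             break
--
--     for j in range(n, -1, -1):
--         if pickups[j] >= 1:
--             break
--
--     if i > j:
--         return i
--     return j
-- ===== SOURCE B (Python) =====
-- def find_first_point(n, deliveries, pickups):
--     best = 0
--     for i in range(n + 1):
--         if deliveries[i] >= 1 or pickups[i] >= 1:
--             best = i
--     return best
-- ===== Notes on version B (the rewrite author's own statement) =====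
-- stated objective: alternative
-- what changed: Replaces A's two backward early-break scans plus a final max comparison with a single forward scan keeping an accumulator of the last index where either array is >= 1.
import Mathlib
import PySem

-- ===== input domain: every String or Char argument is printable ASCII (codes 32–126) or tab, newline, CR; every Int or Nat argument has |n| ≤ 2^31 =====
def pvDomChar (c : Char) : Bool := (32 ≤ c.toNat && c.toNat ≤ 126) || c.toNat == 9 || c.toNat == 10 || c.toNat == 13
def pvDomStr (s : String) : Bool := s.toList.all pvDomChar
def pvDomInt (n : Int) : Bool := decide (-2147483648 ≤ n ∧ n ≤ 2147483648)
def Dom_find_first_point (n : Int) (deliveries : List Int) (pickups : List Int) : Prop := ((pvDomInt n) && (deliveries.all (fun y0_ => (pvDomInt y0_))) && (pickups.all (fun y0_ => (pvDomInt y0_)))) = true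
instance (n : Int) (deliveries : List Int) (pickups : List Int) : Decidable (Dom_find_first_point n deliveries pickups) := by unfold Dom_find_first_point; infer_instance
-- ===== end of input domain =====

-- B replaces A's two backward early-break scans and final max with one forward scan
-- keeping the last index where either array is >= 1.
-- ===== PORT A =====
-- one backward for-loop with break: scans the given index list, breaks at the first
-- index where arr[i] >= 1; if no break, the loop variable ends at the last index (0).
def pvLoopA (arr : List Int) : List Int → Int
  | [] => 0          -- unreachable under Pre_ (range n..0 is nonempty)
  | [i] => i         -- last iteration: i keeps this value whether or not the loop breaks
  | i :: rest => if (PySem.List.pyGetD arr i 0) ≥ 1 then i else pvLoopA arr rest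

def find_first_point (n : Int) (deliveries : List Int) (pickups : List Int) : Int :=
  let i := pvLoopA deliveries (PySem.List.pyRange n (-1) (-1))
  let j := pvLoopA pickups (PySem.List.pyRange n (-1) (-1))
  if i > j then i else j

-- ===== PORT B =====
-- forward scan, accumulator 'best' updated whenever either entry is >= 1
def find_first_point_alt (n : Int) (deliveries : List Int) (pickups : List Int) : Int :=
  (PySem.List.pyRange 0 (n + 1) 1).foldl
    (fun best i =>
      if (PySem.List.pyGetD deliveries i 0) ≥ 1 || (PySem.List.pyGetD pickups i 0) ≥ 1 then i
      else best) 0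

-- ===== PRECONDITION & SPEC =====
-- Pre_ excludes exactly the inputs where A raises: n < 0 leaves the loop variables
-- unbound (NameError), and an index n beyond either list raises IndexError.
def Pre_find_first_point (n : Int) (deliveries : List Int) (pickups : List Int) : Prop :=
  0 ≤ n ∧ n < (deliveries.length : Int) ∧ n < (pickups.length : Int)
instance (n : Int) (deliveries : List Int) (pickups : List Int) : Decidable (Pre_find_first_point n deliveries pickups) := by unfold Pre_find_first_point; infer_instance
def pvWitness_find_first_point : Int × List Int × List Int := (2, [0, 1, 0], [0, 0, 3])
def Spec_find_first_point (n : Int) (deliveries : List Int) (pickups : List Int) (out : Int) : Prop := out = find_first_point_alt n deliveries pickups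
instance (n : Int) (deliveries : List Int) (pickups : List Int) (out : Int) : Decidable (Spec_find_first_point n deliveries pickups out) := by unfold Spec_find_first_point; infer_instance

-- ===== CLAIM (what is proved, stated in full; the proofs are below) =====
def Claim_equal_find_first_point : Prop := ∀ (n : Int) (deliveries : List Int) (pickups : List Int), Dom_find_first_point n deliveries pickups → Pre_find_first_point n deliveries pickups → Spec_find_first_point n deliveries pickups (find_first_point n deliveries pickups)

-- ===== LEMMAS AND PROOFS =====

-- proof-side abbreviations
def pvCond (d p : List Int) (i : Int) : Bool :=
  (PySem.List.pyGetD d i 0) ≥ 1 || (PySem.List.pyGetD p i 0) ≥ 1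

def pvStep (d p : List Int) (best i : Int) : Int :=
  if pvCond d p i then i else best

-- combined backward early-break scan (the intermediary both ports are reduced to)
def pvBack (d p : List Int) : List Int → Int
  | [] => 0
  | [i] => i
  | i :: rest => if pvCond d p i then i else pvBack d p rest

-- on a nonempty index list, the break loop ends at some listed index
theorem pvLoopA_mem (arr : List Int) (idxs : List Int) (h : idxs ≠ []) :
    pvLoopA arr idxs ∈ idxs := by
  induction idxs with
  | nil => exact absurd rfl h
  | cons i rest ih =>
    cases rest with
    | nil => simp [pvLoopA]
    | cons j rest' =>
      simp only [pvLoopA]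
      split
      · exact List.mem_cons_self
      · exact List.mem_cons_of_mem _ (ih (by simp))

-- the combined backward scan equals the max of the two individual scans, on any
-- strictly decreasing index list
theorem pvBack_eq_max (d p : List Int) (idxs : List Int)
    (h : idxs.Pairwise (· > ·)) :
    pvBack d p idxs =
      if pvLoopA d idxs > pvLoopA p idxs then pvLoopA d idxs else pvLoopA p idxs := by
  induction idxs with
  | nil => simp [pvLoopA, pvBack]
  | cons i rest ih =>
    cases rest with
    | nil => simp [pvLoopA, pvBack]
    | cons j rest' =>
      have hne : (j :: rest') ≠ ([] : List Int) := by simp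
      have hlt : ∀ x ∈ j :: rest', x < i := by
        intro x hx
        exact (List.pairwise_cons.mp h).1 x hx
      have hdlt := hlt _ (pvLoopA_mem d (j :: rest') hne)
      have hplt := hlt _ (pvLoopA_mem p (j :: rest') hne)
      have htail := ih (List.pairwise_cons.mp h).2
      simp only [pvLoopA, pvBack, pvCond]
      by_cases h1 : (PySem.List.pyGetD d i 0) ≥ 1 <;>
        by_cases h2 : (PySem.List.pyGetD p i 0) ≥ 1 <;>
          simp [h1, h2, htail] <;> omega

-- pvBack ignores everything after the first two elements of its tail shape:
-- replacing a final [x, a] by [if cond x then x else a] is invisible to the scan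
theorem pvBack_append_pair (d p : List Int) (u : List Int) (x a : Int) :
    pvBack d p (u ++ [x, a]) = pvBack d p (u ++ [pvStep d p a x]) := by
  induction u with
  | nil => simp only [List.nil_append, pvBack, pvStep]
  | cons y u' ih =>
    have h1 : (y :: u') ++ [x, a] = y :: (u' ++ [x, a]) := by simp
    have h2 : (y :: u') ++ [pvStep d p a x] = y :: (u' ++ [pvStep d p a x]) := by simp
    rw [h1, h2]
    cases u' with
    | nil => simp only [List.nil_append, pvBack, pvStep]
    | cons z u'' =>
      have e1 : (z :: u'') ++ [x, a] = z :: (u'' ++ [x, a]) := by simp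
      have e2 : (z :: u'') ++ [pvStep d p a x] = z :: (u'' ++ [pvStep d p a x]) := by simp
      simp only [e1, e2, pvBack] at ih ⊢
      split <;> simp_all

-- the forward accumulator fold equals the backward early-break scan of the
-- reversed index list with the accumulator's start value appended
theorem foldl_eq_pvBack (d p : List Int) (l : List Int) (a : Int) :
    l.foldl (pvStep d p) a = pvBack d p (l.reverse ++ [a]) := by
  induction l generalizing a with
  | nil => simp [pvBack]
  | cons x t ih =>
    have : (x :: t).reverse ++ [a] = t.reverse ++ [x, a] := by simp
    rw [this, List.foldl_cons, ih (pvStep d p a x), pvBack_append_pair]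

theorem pyRange_countdown_pairwise (a b : Int) :
    (PySem.List.pyRange a b (-1)).Pairwise (· > ·) := by
  rw [PySem.List.pyRange_neg_one_eq_reverse, List.pairwise_reverse]
  exact PySem.List.pairwise_lt_pyRange_one (b + 1) (a + 1)

-- ===== VERDICT (by name: the statement is the Claim_ definition above) =====
theorem find_first_point_spec : Claim_equal_find_first_point := by
  intro n deliveries pickups _ hpre
  obtain ⟨hn, hd, hp⟩ := hpre
  unfold Spec_find_first_point find_first_point find_first_point_alt
  have hback := pvBack_eq_max deliveries pickups (PySem.List.pyRange n (-1) (-1))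
      (pyRange_countdown_pairwise n (-1))
  have hcons : PySem.List.pyRange 0 (n + 1) 1 = 0 :: PySem.List.pyRange 1 (n + 1) 1 :=
    PySem.List.pyRange_one_cons (by omega)
  have hrev : PySem.List.pyRange n (-1) (-1) =
      (PySem.List.pyRange 1 (n + 1) 1).reverse ++ [0] := by
    rw [PySem.List.pyRange_neg_one_eq_reverse]
    show ((PySem.List.pyRange 0 (n + 1) 1).reverse) = _
    rw [hcons]; simp
  have hfold : (PySem.List.pyRange 0 (n + 1) 1).foldl (pvStep deliveries pickups) 0 =
      pvBack deliveries pickups (PySem.List.pyRange n (-1) (-1)) := by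
    rw [hcons, List.foldl_cons]
    have hz : pvStep deliveries pickups 0 0 = 0 := by
      simp only [pvStep]; split <;> rfl
    rw [hz, foldl_eq_pvBack, hrev]
  calc (if pvLoopA deliveries (PySem.List.pyRange n (-1) (-1)) >
            pvLoopA pickups (PySem.List.pyRange n (-1) (-1)) then
          pvLoopA deliveries (PySem.List.pyRange n (-1) (-1))
        else pvLoopA pickups (PySem.List.pyRange n (-1) (-1)))
      = pvBack deliveries pickups (PySem.List.pyRange n (-1) (-1)) := hback.symm
    _ = (PySem.List.pyRange 0 (n + 1) 1).foldl (pvStep deliveries pickups) 0 := hfold.symm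
    _ = _ := rfl
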